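-- pv_equiv track=rewrite | github.com/oceans20737/Collats-6 | Collatz-6_Code.py | v6
-- ===== SOURCE A (Python) =====
-- def v6(n: int) -> int:
--     """Return the largest k such that 6**k divides n."""
--     if n == 0:
--         return 0
--     k = 0
--     while n % 6 == 0:
--         n //= 6
--         k += 1
--     return k
-- ===== SOURCE B (Python) =====
-- def v6(n: int) -> int:
--     """Return the largest k such that 6**k divides n."""
--     if n == 0:
--         return 0
--     m = abs(n)
--     k = 0
--     p = 6
--     while m % p == 0:
--         k += 1
--         p *= 6
--     return k
-- ===== Notes on version B (the rewrite author's own statement) =====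
-- stated objective: alternative
-- what changed: Instead of repeatedly dividing n by 6 and counting, B keeps n fixed (as abs(n)) and tests it against successively larger powers of six until one no longer divides it; n is never mutated and no floor division is performed.
import Mathlib
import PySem

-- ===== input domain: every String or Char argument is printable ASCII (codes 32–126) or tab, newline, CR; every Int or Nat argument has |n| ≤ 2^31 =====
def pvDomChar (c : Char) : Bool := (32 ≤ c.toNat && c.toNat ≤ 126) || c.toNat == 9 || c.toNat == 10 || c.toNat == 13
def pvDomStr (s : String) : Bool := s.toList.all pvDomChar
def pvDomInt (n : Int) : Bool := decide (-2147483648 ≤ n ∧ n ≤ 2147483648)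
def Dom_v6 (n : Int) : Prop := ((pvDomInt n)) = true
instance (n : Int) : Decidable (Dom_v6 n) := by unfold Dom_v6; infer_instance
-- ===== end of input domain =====

-- B replaces A's divide-n-by-6-and-count loop by testing the FIXED |n| against a
-- growing power of six until p no longer divides it (objective: alternative).

-- termination lemma for A's loop (exact division by 6 shrinks |n|)
theorem pv_div6_natAbs_lt (n : Int) (hn : n ≠ 0) (hd : PySem.Int.mod n 6 = 0) :
    (PySem.Int.floordiv n 6).natAbs < n.natAbs := by
  have hdvd : (6:Int) ∣ n := (PySem.Int.mod_eq_zero_iff_dvd n 6).mp hd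
  rw [PySem.Int.floordiv_eq_ediv_of_pos (by omega)]
  obtain ⟨t, ht⟩ := hdvd
  subst ht
  rw [Int.mul_ediv_cancel_left _ (by omega : (6:Int) ≠ 0)]
  omega

-- termination lemma for B's loop (the quotient witness m / p shrinks as p grows)
theorem pv_quot_toNat_lt (m p : Int) (h : 0 < m ∧ 0 < p ∧ PySem.Int.mod m p = 0) :
    (m / (p * 6)).toNat < (m / p).toNat := by
  obtain ⟨hm, hp, hmod⟩ := h
  obtain ⟨t, ht⟩ := (PySem.Int.mod_eq_zero_iff_dvd m p).mp hmod
  subst ht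
  have ht0 : 0 < t := by by_contra h'; push Not at h'; nlinarith
  rw [Int.mul_ediv_cancel_left _ (by omega : p ≠ 0),
      Int.mul_ediv_mul_of_pos _ _ hp]
  omega

-- ===== PORT A =====
-- the 'n ≠ 0' conjunct only makes the loop total: A's caller guarantees it
-- (n == 0 returns before the loop) and exact division keeps n nonzero
def v6Loop (n k : Int) : Int :=
  if h : n ≠ 0 ∧ PySem.Int.mod n 6 = 0 then
    v6Loop (PySem.Int.floordiv n 6) (k + 1)
  else k
termination_by n.natAbs
decreasing_by exact pv_div6_natAbs_lt n h.1 h.2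

def v6 (n : Int) : Int :=
  if n = 0 then 0 else v6Loop n 0

-- ===== PORT B =====
-- the '0 < m ∧ 0 < p' conjuncts only make the loop total: B calls it with
-- m = |n| > 0 and p = 6, and p only grows
def v6AltLoop (m p k : Int) : Int :=
  if h : 0 < m ∧ 0 < p ∧ PySem.Int.mod m p = 0 then
    v6AltLoop m (p * 6) (k + 1)
  else k
termination_by (m / p).toNat
decreasing_by exact pv_quot_toNat_lt m p h

def v6_alt (n : Int) : Int :=
  if n = 0 then 0 else v6AltLoop |n| 6 0

-- ===== PRECONDITION & SPEC =====
def Spec_v6 (n : Int) (out : Int) : Prop := out = v6_alt n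
instance (n : Int) (out : Int) : Decidable (Spec_v6 n out) := by unfold Spec_v6; infer_instance

-- ===== CLAIM (what is proved, stated in full; the proofs are below) =====
def Claim_equal_v6 : Prop := ∀ (n : Int), Dom_v6 n → Spec_v6 n (v6 n)

-- ===== LEMMAS AND PROOFS =====

-- bridge: after j successful rounds, A's state is n / 6^j while B tests |n| against 6^(j+1)
theorem v6_bridge :
    ∀ (N : Nat) (n : Int), n ≠ 0 → ∀ (j : Nat) (k : Int), (6:Int)^j ∣ n →
      (n / 6^j).natAbs ≤ N → v6AltLoop |n| (6^(j+1)) k = v6Loop (n / 6^j) k := by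
  intro N
  induction N with
  | zero =>
      intro n hn j k hdvd hN
      exfalso
      have : n / 6^j ≠ 0 := by
        obtain ⟨t, ht⟩ := hdvd
        subst ht
        rw [Int.mul_ediv_cancel_left _ (by positivity)]
        rintro rfl; simp at hn
      omega
  | succ N ih =>
      intro n hn j k hdvd hN
      have hq0 : n / 6^j ≠ 0 := by
        obtain ⟨t, ht⟩ := hdvd
        subst ht
        rw [Int.mul_ediv_cancel_left _ (by positivity)]
        rintro rfl; simp at hn
      by_cases hd : (6:Int)^(j+1) ∣ n
      · -- both loops take one more step
        obtain ⟨t, ht⟩ := hd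
        have hq6t : n / 6^j = 6 * t := by
          rw [ht, pow_succ, show (6:Int)^j * 6 * t = 6^j * (6 * t) by ring,
              Int.mul_ediv_cancel_left _ (by positivity)]
        have hd6 : (6:Int) ∣ n / 6^j := ⟨t, hq6t⟩
        have hstepq : n / 6^j / 6 = n / 6^(j+1) := by
          rw [hq6t, Int.mul_ediv_cancel_left _ (by omega : (6:Int) ≠ 0), ht,
              Int.mul_ediv_cancel_left _ (by positivity)]
        -- A steps
        rw [v6Loop, dif_pos ⟨hq0, (PySem.Int.mod_eq_zero_iff_dvd _ 6).mpr hd6⟩,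
            PySem.Int.floordiv_eq_ediv_of_pos (by omega), hstepq]
        -- B steps
        have habs : (6:Int)^(j+1) ∣ |n| := (dvd_abs _ _).mpr ⟨t, ht⟩
        rw [v6AltLoop, dif_pos ⟨by simpa using hn, by positivity,
              (PySem.Int.mod_eq_zero_iff_dvd _ _).mpr habs⟩,
            show (6:Int)^(j+1) * 6 = 6^(j+1+1) from (pow_succ 6 (j+1)).symm]
        -- measure shrinks
        have hlt : (n / 6^(j+1)).natAbs < (n / 6^j).natAbs := by
          rw [← hstepq]
          have := pv_div6_natAbs_lt (n / 6^j) hq0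
            ((PySem.Int.mod_eq_zero_iff_dvd _ 6).mpr hd6)
          rwa [PySem.Int.floordiv_eq_ediv_of_pos (by omega)] at this
        exact ih n hn (j+1) (k+1) ⟨t, ht⟩ (by omega)
      · -- both loops stop
        have hd6 : ¬ (6:Int) ∣ n / 6^j := by
          intro hc
          apply hd
          obtain ⟨s, hs⟩ := hdvd
          obtain ⟨t, ht'⟩ := hc
          have hsq : n / 6^j = s := by
            rw [hs, Int.mul_ediv_cancel_left _ (by positivity)]
          refine ⟨t, ?_⟩
          have hst : s = 6 * t := hsq ▸ ht'
          rw [hs, hst, pow_succ]; ring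
        have habs : ¬ (6:Int)^(j+1) ∣ |n| := fun h => hd ((dvd_abs _ _).mp h)
        rw [v6Loop, dif_neg (by
              rintro ⟨_, hm⟩
              exact hd6 ((PySem.Int.mod_eq_zero_iff_dvd _ 6).mp hm)),
            v6AltLoop, dif_neg (by
              rintro ⟨_, _, hm⟩
              exact habs ((PySem.Int.mod_eq_zero_iff_dvd _ _).mp hm))]

-- ===== VERDICT (by name: the statement is the Claim_ definition above) =====
theorem v6_spec : Claim_equal_v6 := by
  intro n _
  unfold Spec_v6 v6 v6_alt
  by_cases hn : n = 0
  · simp [hn]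
  · simp only [if_neg hn]
    have := v6_bridge (n / 6^0).natAbs n hn 0 0 (by simp) le_rfl
    simpa using this.symm
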